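-- pv_equiv track=rewrite | github.com/apache/ambari | ambari-agent/src/main/python/ambari_agent/PackagesAnalyzer.py | getPackageDetails
-- ===== SOURCE A (Python) =====
-- def getPackageDetails(installedPackages, foundPackages):
--   packageDetails = []
--   for package in foundPackages:
--     pkgDetail = {}
--     for installedPackage in installedPackages:
--       if package == installedPackage[0]:
--         pkgDetail['name'] = installedPackage[0]
--         pkgDetail['version'] = installedPackage[1]
--         pkgDetail['repoName'] = installedPackage[2]
--     packageDetails.append(pkgDetail)
--   return packageDetails
-- ===== SOURCE B (Python) =====
-- def getPackageDetails(installedPackages, foundPackages):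
--   found = set(foundPackages)
--   last = {}
--   for rec in installedPackages:
--     if len(rec) >= 3 and rec[0] in found:
--       last[rec[0]] = {'name': rec[0], 'version': rec[1], 'repoName': rec[2]}
--   return [dict(last.get(p, {})) for p in foundPackages]
-- ===== Notes on version B (the rewrite author's own statement) =====
-- stated objective: alternative
-- what changed: Replaces A's per-found-package rescan of installedPackages by a single pass over installedPackages that indexes the last matching record per name in a dict, then one lookup per found package (O(n+m) passes instead of O(n*m); no speed claim, the sandbox a timing run could not measure it).
import Mathlib
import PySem

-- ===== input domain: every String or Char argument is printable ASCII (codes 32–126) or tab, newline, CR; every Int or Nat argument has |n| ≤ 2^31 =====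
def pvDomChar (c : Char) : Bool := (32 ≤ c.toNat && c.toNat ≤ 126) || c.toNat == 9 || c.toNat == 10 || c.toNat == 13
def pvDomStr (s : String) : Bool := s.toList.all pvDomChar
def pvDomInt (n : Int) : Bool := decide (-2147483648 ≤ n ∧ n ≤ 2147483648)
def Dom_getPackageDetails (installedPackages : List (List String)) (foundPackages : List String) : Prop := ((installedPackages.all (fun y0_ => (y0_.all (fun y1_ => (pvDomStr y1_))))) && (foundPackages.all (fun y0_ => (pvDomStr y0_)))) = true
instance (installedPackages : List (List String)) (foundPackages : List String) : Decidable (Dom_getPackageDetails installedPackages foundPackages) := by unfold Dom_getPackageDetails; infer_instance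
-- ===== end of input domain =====

-- B replaces A's per-found-package rescans of installedPackages by one pass over installedPackages
-- that records the last matching record per name in a dict, then a single lookup per found package
-- (objective: alternative, a dict index instead of nested scans).
-- Equivalence is about the RETURN value; neither program mutates its arguments.

-- ===== PORT A =====
-- indices 0,1,2 are in range wherever Pre_ holds, so List.getD is exact there
def getPackageDetails (installedPackages : List (List String)) (foundPackages : List String) : List (List (String × String)) :=
  foundPackages.foldl (fun acc package =>
    let pkgDetail : PySem.Dict String String :=
      installedPackages.foldl (fun d ip =>
        if package == ip.getD 0 "" then
          ((d.insert "name" (ip.getD 0 "")).insert "version" (ip.getD 1 "")).insert "repoName" (ip.getD 2 "")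
        else d) PySem.Dict.empty
    acc ++ [pkgDetail.items]) []

-- ===== PORT B =====
def getPackageDetails_alt (installedPackages : List (List String)) (foundPackages : List String) : List (List (String × String)) :=
  let found : PySem.Set String := PySem.Set.ofList foundPackages
  let last : PySem.Dict String (List (String × String)) :=
    installedPackages.foldl (fun m rec =>
      if 3 ≤ rec.length ∧ rec.getD 0 "" ∈ found then
        m.insert (rec.getD 0 "")
          [("name", rec.getD 0 ""), ("version", rec.getD 1 ""), ("repoName", rec.getD 2 "")]
      else m) PySem.Dict.empty
  foundPackages.map (fun p => last.getD p [])

-- ===== PRECONDITION & SPEC =====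
-- Pre_ excludes exactly the inputs where A raises IndexError: an empty installed record while
-- foundPackages is nonempty, or a record shorter than 3 whose name is among foundPackages.
def Pre_getPackageDetails (installedPackages : List (List String)) (foundPackages : List String) : Prop :=
  (foundPackages = [] ∨ ∀ rec ∈ installedPackages, rec ≠ []) ∧
  (∀ rec ∈ installedPackages, rec.getD 0 "" ∈ foundPackages → 3 ≤ rec.length)
instance (installedPackages : List (List String)) (foundPackages : List String) : Decidable (Pre_getPackageDetails installedPackages foundPackages) := by unfold Pre_getPackageDetails; infer_instance

def pvWitness_getPackageDetails : List (List String) × List String :=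
  ([["a", "1", "r1"], ["b", "2", "r2"], ["a", "3", "r3"]], ["a", "c", "a"])

def Spec_getPackageDetails (installedPackages : List (List String)) (foundPackages : List String) (out : List (List (String × String))) : Prop := out = getPackageDetails_alt installedPackages foundPackages
instance (installedPackages : List (List String)) (foundPackages : List String) (out : List (List (String × String))) : Decidable (Spec_getPackageDetails installedPackages foundPackages out) := by unfold Spec_getPackageDetails; infer_instance

-- ===== CLAIM (what is proved, stated in full; the proofs are below) =====
def Claim_equal_getPackageDetails : Prop := ∀ (installedPackages : List (List String)) (foundPackages : List String), Dom_getPackageDetails installedPackages foundPackages → Pre_getPackageDetails installedPackages foundPackages → Spec_getPackageDetails installedPackages foundPackages (getPackageDetails installedPackages foundPackages)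

-- ===== LEMMAS AND PROOFS =====

-- the items list of the three-key dict both programs build for a matching record
def pvTriple (ip : List String) : List (String × String) :=
  [("name", ip.getD 0 ""), ("version", ip.getD 1 ""), ("repoName", ip.getD 2 "")]

def pvDictOf (cur : Option (List String)) : PySem.Dict String String :=
  match cur with
  | none => PySem.Dict.empty
  | some ip => PySem.Dict.mk (pvTriple ip)

lemma pvStep_triple (cur : Option (List String)) (ip : List String) :
    (((pvDictOf cur).insert "name" (ip.getD 0 "")).insert "version" (ip.getD 1 "")).insert
      "repoName" (ip.getD 2 "") = pvDictOf (some ip) := by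
  cases cur with
  | none => rfl
  | some ip' => rfl

lemma pvGetLast?_cons {α : Type} (x : α) (l : List α) :
    (x :: l).getLast? = l.getLast?.orElse (fun _ => some x) := by
  induction l generalizing x with
  | nil => rfl
  | cons y l ih =>
    rw [List.getLast?_cons_cons, ih y]
    cases l.getLast? <;> simp [Option.orElse]

-- characterisation of A's inner loop: the accumulator is always of shape pvDictOf
lemma pvInnerA (p : String) (xs : List (List String)) (cur : Option (List String)) :
    xs.foldl (fun d ip =>
        if p == ip.getD 0 "" then
          ((d.insert "name" (ip.getD 0 "")).insert "version" (ip.getD 1 "")).insert "repoName" (ip.getD 2 "")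
        else d) (pvDictOf cur)
      = pvDictOf ((xs.filter (fun ip => p == ip.getD 0 "")).getLast?.orElse (fun _ => cur)) := by
  induction xs generalizing cur with
  | nil => simp
  | cons x xs ih =>
    by_cases h : (p == x.getD 0 "") = true
    · rw [List.foldl_cons, List.filter_cons, if_pos h, if_pos h, pvStep_triple, ih (some x),
        pvGetLast?_cons]
      cases (xs.filter (fun ip => p == ip.getD 0 "")).getLast? <;> simp [Option.orElse]
    · rw [List.foldl_cons, List.filter_cons, if_neg h, if_neg h]
      exact ih cur

-- characterisation of B's pass: what the dict holds at key p after the fold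
lemma pvInnerB (found : PySem.Set String) (p : String) (xs : List (List String))
    (m : PySem.Dict String (List (String × String))) :
    (xs.foldl (fun m rec =>
        if 3 ≤ rec.length ∧ rec.getD 0 "" ∈ found then
          m.insert (rec.getD 0 "") (pvTriple rec)
        else m) m).getD p []
      = ((xs.filter (fun rec =>
            decide (3 ≤ rec.length ∧ rec.getD 0 "" ∈ found ∧ rec.getD 0 "" = p))).getLast?.elim
          (m.getD p []) pvTriple) := by
  induction xs generalizing m with
  | nil => simp
  | cons x xs ih =>
    by_cases hc : 3 ≤ x.length ∧ x.getD 0 "" ∈ found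
    · by_cases hp : x.getD 0 "" = p
      · have hdec : decide (3 ≤ x.length ∧ x.getD 0 "" ∈ found ∧ x.getD 0 "" = p) = true :=
          decide_eq_true ⟨hc.1, hc.2, hp⟩
        rw [List.foldl_cons, if_pos hc, List.filter_cons, hdec, if_pos rfl, ih,
          pvGetLast?_cons]
        cases (xs.filter (fun rec =>
            decide (3 ≤ rec.length ∧ rec.getD 0 "" ∈ found ∧ rec.getD 0 "" = p))).getLast? with
        | none =>
          show (m.insert (x.getD 0 "") (pvTriple x)).getD p [] = pvTriple x
          rw [hp, PySem.Dict.getD_insert_self]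
        | some a => simp [Option.orElse]
      · have hdec : decide (3 ≤ x.length ∧ x.getD 0 "" ∈ found ∧ x.getD 0 "" = p) = false :=
          decide_eq_false (fun hh => hp hh.2.2)
        rw [List.foldl_cons, if_pos hc, List.filter_cons, hdec, if_neg (by decide), ih,
          PySem.Dict.getD_insert_of_ne m (pvTriple x) [] (Ne.symm hp)]
    · have hdec : decide (3 ≤ x.length ∧ x.getD 0 "" ∈ found ∧ x.getD 0 "" = p) = false :=
        decide_eq_false (fun hh => hc ⟨hh.1, hh.2.1⟩)
      rw [List.foldl_cons, if_neg hc, List.filter_cons, hdec, if_neg (by decide)]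
      exact ih m

lemma pvInnerA_empty (p : String) (xs : List (List String)) :
    xs.foldl (fun d ip =>
        if p == ip.getD 0 "" then
          ((d.insert "name" (ip.getD 0 "")).insert "version" (ip.getD 1 "")).insert "repoName" (ip.getD 2 "")
        else d) PySem.Dict.empty
      = pvDictOf (xs.filter (fun ip => p == ip.getD 0 "")).getLast? := by
  have h := pvInnerA p xs none
  rw [show pvDictOf none = PySem.Dict.empty from rfl] at h
  rw [h]
  congr 1
  cases (xs.filter (fun ip => p == ip.getD 0 "")).getLast? <;> rfl

lemma pvItems_dictOf (o : Option (List String)) :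
    (pvDictOf o).items = o.elim [] pvTriple := by
  cases o <;> rfl

-- ===== VERDICT (by name: the statement is the Claim_ definition above) =====
theorem getPackageDetails_spec : Claim_equal_getPackageDetails := by
  intro installed found _ hpre
  unfold Spec_getPackageDetails getPackageDetails getPackageDetails_alt
  rw [PySem.List.foldl_append_singleton_eq_map]
  apply List.map_congr_left
  intro p hp
  rw [pvInnerA_empty, pvItems_dictOf]
  rw [show (fun (m : PySem.Dict String (List (String × String))) (rec : List String) =>
        if 3 ≤ rec.length ∧ rec.getD 0 "" ∈ PySem.Set.ofList found then
          m.insert (rec.getD 0 "")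
            [("name", rec.getD 0 ""), ("version", rec.getD 1 ""), ("repoName", rec.getD 2 "")]
        else m)
      = (fun m rec =>
        if 3 ≤ rec.length ∧ rec.getD 0 "" ∈ PySem.Set.ofList found then
          m.insert (rec.getD 0 "") (pvTriple rec)
        else m) from rfl]
  rw [pvInnerB]
  -- the two filters keep exactly the same records, given Pre_ and p ∈ found
  have hfound : found ≠ [] := by rintro rfl; exact absurd hp (by simp)
  have hne : ∀ rec ∈ installed, rec ≠ [] := hpre.1.resolve_left hfound
  have hfilter : installed.filter (fun ip => p == ip.getD 0 "")
      = installed.filter (fun rec =>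
          decide (3 ≤ rec.length ∧ rec.getD 0 "" ∈ PySem.Set.ofList found ∧ rec.getD 0 "" = p)) := by
    apply List.filter_congr
    intro rec hrec
    by_cases h : rec.getD 0 "" = p
    · have hmem : rec.getD 0 "" ∈ found := h ▸ hp
      have hlen := hpre.2 rec hrec hmem
      have hsm : rec.getD 0 "" ∈ PySem.Set.ofList found := by
        rw [PySem.Set.mem_ofList]; exact hmem
      rw [show (p == rec.getD 0 "") = true from beq_iff_eq.mpr h.symm]
      exact (decide_eq_true ⟨hlen, hsm, h⟩).symm
    · rw [show (p == rec.getD 0 "") = false from beq_eq_false_iff_ne.mpr (fun e => h e.symm)]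
      exact (decide_eq_false (fun hh => h hh.2.2)).symm
  rw [hfilter]
  cases (installed.filter (fun rec =>
      decide (3 ≤ rec.length ∧ rec.getD 0 "" ∈ PySem.Set.ofList found ∧ rec.getD 0 "" = p))).getLast? <;>
    rfl
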